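-- pv_equiv track=rewrite | github.com/alexjgriffith4-a11y/pet-care-agent | actions/pet_profile.py | is_profile_in_progress
-- ===== SOURCE A (Python) =====
-- PROFILE_FOLLOWUP_MARKERS = (
--     "what is your pet's name",
--     "what's your pet's name",
--     "a dog or a cat",
--     "how old is",
--     "what breed is",
-- )
--
-- def is_profile_in_progress(conversation_history: list[dict] | None) -> bool:
--     """
--     Return True if the most recent assistant turn was a profile follow-up
--     question — i.e. the agent is mid-collection.
--     """
--     if not conversation_history:
--         return False
--     for turn in reversed(conversation_history):
--         if turn.get("role") == "assistant":
--             content = (turn.get("content") or "").lower()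
--             return any(marker in content for marker in PROFILE_FOLLOWUP_MARKERS)
--     return False
-- ===== SOURCE B (Python) =====
-- PROFILE_FOLLOWUP_MARKERS = (
--     "what is your pet's name",
--     "what's your pet's name",
--     "a dog or a cat",
--     "how old is",
--     "what breed is",
-- )
--
-- def is_profile_in_progress(conversation_history: "list[dict] | None") -> bool:
--     # Forward pass: collect assistant contents, judge only the last one.
--     contents = [(t.get("content") or "")
--                 for t in (conversation_history or [])
--                 if t.get("role") == "assistant"]
--     if not contents:
--         return False
--     last = contents[-1].lower()
--     return any(marker in last for marker in PROFILE_FOLLOWUP_MARKERS)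
-- ===== Notes on version B (the rewrite author's own statement) =====
-- stated objective: idiomatic
-- what changed: Replaces the backward early-return scan with a forward comprehension that collects assistant contents and judges the last element.
import Mathlib
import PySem

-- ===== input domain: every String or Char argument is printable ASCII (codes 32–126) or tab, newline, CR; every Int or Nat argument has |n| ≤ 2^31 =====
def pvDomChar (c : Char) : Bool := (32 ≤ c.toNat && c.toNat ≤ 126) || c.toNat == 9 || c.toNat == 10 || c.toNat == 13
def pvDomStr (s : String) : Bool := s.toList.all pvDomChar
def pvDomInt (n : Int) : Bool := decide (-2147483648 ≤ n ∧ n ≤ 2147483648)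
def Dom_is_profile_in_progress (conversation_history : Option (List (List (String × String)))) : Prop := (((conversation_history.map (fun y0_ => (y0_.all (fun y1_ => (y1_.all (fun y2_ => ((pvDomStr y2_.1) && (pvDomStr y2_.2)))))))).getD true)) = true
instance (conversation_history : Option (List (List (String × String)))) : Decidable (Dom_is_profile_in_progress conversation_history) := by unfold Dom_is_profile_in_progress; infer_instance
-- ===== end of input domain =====

-- B replaces A's backward early-return scan by a forward filter/map collecting assistant
-- contents and judging the last element (objective: idiomatic; same cost).

def pvMarkers : List String :=
  ["what is your pet's name", "what's your pet's name", "a dog or a cat",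
   "how old is", "what breed is"]

-- ===== PORT A =====
-- scan over reversed(conversation_history); dict.get via first-match assoc lookup
def pvGoA : List (List (String × String)) → Bool
  | [] => false
  | t :: rest =>
    if List.lookup "role" t == some "assistant" then
      let content := PySem.Str.lower ((List.lookup "content" t).getD "")
      pvMarkers.any (fun m => PySem.Str.isIn m content)
    else pvGoA rest

def is_profile_in_progress (conversation_history : Option (List (List (String × String)))) : Bool :=
  match conversation_history with
  | none => false
  | some h => if h.isEmpty then false else pvGoA h.reverse

-- ===== PORT B =====
def is_profile_in_progress_alt (conversation_history : Option (List (List (String × String)))) : Bool :=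
  let h := match conversation_history with | none => [] | some h => h
  let contents := (h.filter (fun t => List.lookup "role" t == some "assistant")).map
      (fun t => (List.lookup "content" t).getD "")
  match PySem.List.pyGet? contents (-1) with
  | none => false
  | some c =>
    let last := PySem.Str.lower c
    pvMarkers.any (fun m => PySem.Str.isIn m last)

-- ===== PRECONDITION & SPEC =====
def Spec_is_profile_in_progress (conversation_history : Option (List (List (String × String)))) (out : Bool) : Prop := out = is_profile_in_progress_alt conversation_history
instance (conversation_history : Option (List (List (String × String)))) (out : Bool) : Decidable (Spec_is_profile_in_progress conversation_history out) := by unfold Spec_is_profile_in_progress; infer_instance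

-- ===== CLAIM (what is proved, stated in full; the proofs are below) =====
def Claim_equal_is_profile_in_progress : Prop := ∀ (conversation_history : Option (List (List (String × String)))), Dom_is_profile_in_progress conversation_history → Spec_is_profile_in_progress conversation_history (is_profile_in_progress conversation_history)

-- ===== LEMMAS AND PROOFS =====

def pvJudge (t : List (String × String)) : Bool :=
  pvMarkers.any (fun m => PySem.Str.isIn m (PySem.Str.lower ((List.lookup "content" t).getD "")))

-- backward scan = judge the last assistant turn of the filtered list
theorem pvGoA_eq (h : List (List (String × String))) :
    pvGoA h.reverse =
      match (h.filter (fun t => List.lookup "role" t == some "assistant")).getLast? with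
      | none => false
      | some t => pvJudge t := by
  induction h using List.reverseRecOn with
  | nil => rfl
  | append_singleton l a ih =>
    rw [List.reverse_append, List.filter_append]
    by_cases hr : (List.lookup "role" a == some "assistant") = true
    · simp [pvGoA, hr, pvJudge]
    · simp only [Bool.not_eq_true] at hr
      simp [pvGoA, hr, ih]

theorem is_profile_in_progress_spec : Claim_equal_is_profile_in_progress := by
  intro ch _
  unfold Spec_is_profile_in_progress is_profile_in_progress is_profile_in_progress_alt
  match ch with
  | none => rfl
  | some h =>
    simp only
    rw [PySem.List.pyGet?_neg_one, List.getLast?_map]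
    by_cases he : h.isEmpty
    · rw [List.isEmpty_iff] at he; subst he; rfl
    · simp only [he]
      rw [pvGoA_eq]
      cases (h.filter (fun t => List.lookup "role" t == some "assistant")).getLast? with
      | none => rfl
      | some t => rfl
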